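-- pv_equiv track=rewrite | github.com/ShengyangT/NYU-CSCI-UA-469-NLP-Project_Assignments | Assignment 5 - Sequence Labeling (Noun Groups)/final_features.py | tokens_since_last
-- ===== SOURCE A (Python) =====
-- from typing import List, Optional
--
-- def tokens_since_last(sentence: List[dict], index: int, target_pos: str) -> str:
--     distance = 0
--     collected: List[str] = []
--     for j in range(index - 1, -1, -1):
--         pos = sentence[j]["pos"]
--         if pos == target_pos:
--             break
--         collected.append(pos)
--         distance += 1
--     if distance == 0:
--         return "NONE"
--     collected = collected[:3]
--     collected.reverse()
--     chain = "+".join(collected)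
--     bucket = str(distance) if distance <= 5 else ">5"
--     return f"{bucket}:{chain}" if chain else bucket
-- ===== SOURCE B (Python) =====
-- def tokens_since_last(sentence, index, target_pos):
--     tags = [t["pos"] for t in sentence[:max(index, 0)]]
--     r = tags[::-1]
--     try:
--         k = r.index(target_pos)
--     except ValueError:
--         k = len(r)
--     if k == 0:
--         return "NONE"
--     chain = "+".join(tags[len(tags) - min(k, 3):])
--     bucket = str(k) if k <= 5 else ">5"
--     return f"{bucket}:{chain}" if chain else bucket
-- ===== Notes on version B (the rewrite author's own statement) =====
-- stated objective: alternative
-- what changed: A scans backwards with an explicit break loop accumulating distance and a collected list it later truncates and reverses; B builds the prefix POS-tag list once, locates the last target occurrence via .index on the reversed list, and reads distance and the 3-nearest-tag chain off that list with slicing, with no manual loop at all.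
-- outside the precondition, e.g. on tokens_since_last([{'a': 'b'}, {'pos': 'T'}], 2, 'T'): A returns 'NONE', B raises KeyError
import Mathlib
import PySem

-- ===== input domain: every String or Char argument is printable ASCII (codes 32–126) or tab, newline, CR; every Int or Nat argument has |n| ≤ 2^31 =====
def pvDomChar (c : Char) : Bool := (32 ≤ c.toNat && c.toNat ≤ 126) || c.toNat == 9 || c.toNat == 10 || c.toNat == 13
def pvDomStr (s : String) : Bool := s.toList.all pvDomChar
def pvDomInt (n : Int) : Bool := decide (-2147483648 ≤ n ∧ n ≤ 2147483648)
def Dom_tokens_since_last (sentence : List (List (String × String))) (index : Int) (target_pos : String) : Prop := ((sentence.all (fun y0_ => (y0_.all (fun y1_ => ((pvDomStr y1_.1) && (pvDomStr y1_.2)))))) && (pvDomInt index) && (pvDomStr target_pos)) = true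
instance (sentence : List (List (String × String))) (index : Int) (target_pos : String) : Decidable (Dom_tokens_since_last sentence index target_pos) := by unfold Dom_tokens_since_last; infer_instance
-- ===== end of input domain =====

-- B replaces A's backward break-loop by: build the prefix tag list once, find the last target
-- with .index on the reversed list, and read distance/chain off slices (objective: alternative).

-- t["pos"]: first-match key lookup, total via getD — Pre_ keeps every access either program
-- performs with the key present, so the default is never observed inside Pre_
def posOf (t : List (String × String)) : String :=
  ((PySem.Dict.mk t).get? "pos").getD ""

-- ===== PORT A =====
-- sentence[j]: in range under Pre_ (j < index ≤ len), total via getD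
def pvPosAt (sentence : List (List (String × String))) (j : Nat) : String :=
  posOf ((PySem.List.pyGet? sentence (j : Int)).getD [])

-- the loop 'for j in range(index-1, -1, -1)' with its break, as descending structural recursion;
-- returns (distance, collected) for the iterations j, j-1, …, 0
def tokensALoop (sentence : List (List (String × String))) (target_pos : String) : Nat → Int × List String
  | 0 =>
    let pos := pvPosAt sentence 0
    if pos = target_pos then (0, []) else (1, [pos])
  | j + 1 =>
    let pos := pvPosAt sentence (j + 1)
    if pos = target_pos then (0, [])
    else
      let r := tokensALoop sentence target_pos j
      (r.1 + 1, pos :: r.2)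

def tokens_since_last (sentence : List (List (String × String))) (index : Int) (target_pos : String) : String :=
  let st : Int × List String :=
    if index - 1 < 0 then (0, []) else tokensALoop sentence target_pos (index - 1).toNat
  let distance := st.1
  if distance = 0 then "NONE"
  else
    let collected := PySem.List.slice st.2 none (some 3)   -- collected[:3]
    let collected := collected.reverse                     -- collected.reverse()
    let chain := PySem.Str.join "+" collected
    let bucket := if distance ≤ 5 then PySem.Int.toStr distance else ">5"
    if chain ≠ "" then bucket ++ ":" ++ chain else bucket

-- ===== PORT B =====
def tokens_since_last_alt (sentence : List (List (String × String))) (index : Int) (target_pos : String) : String :=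
  let tags := (PySem.List.slice sentence none (some (max index 0))).map posOf
                                                              -- [t["pos"] for t in sentence[:max(index, 0)]]
  let r := tags.reverse                                       -- tags[::-1]
  let k : Int :=                                              -- r.index(target_pos) / except ValueError: len(r)
    match PySem.List.index? r target_pos with
    | some i => (i : Int)
    | none => (r.length : Int)
  if k = 0 then "NONE"
  else
    let chain := PySem.Str.join "+"
      (PySem.List.slice tags (some ((tags.length : Int) - min k 3)) none)  -- tags[len(tags)-min(k,3):]
    let bucket := if k ≤ 5 then PySem.Int.toStr k else ">5"
    if chain ≠ "" then bucket ++ ":" ++ chain else bucket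

-- ===== PRECONDITION & SPEC =====
-- Pre_ excludes inputs on which the POS accesses raise: index > len(sentence) (A raises
-- IndexError) and prefixes sentence[:index] containing a token without a "pos" key — there A
-- raises KeyError mid-scan unless a closer target token shields it, while B, which reads all
-- prefix tags up front, always raises KeyError; the shielded case (A returns "NONE", B raises)
-- is the only excluded input class on which A returns.
def Pre_tokens_since_last (sentence : List (List (String × String))) (index : Int) (target_pos : String) : Prop :=
  index ≤ sentence.length ∧
  ∀ t ∈ sentence.take (max index 0).toNat, (PySem.Dict.mk t).contains "pos" = true
instance (sentence : List (List (String × String))) (index : Int) (target_pos : String) : Decidable (Pre_tokens_since_last sentence index target_pos) := by unfold Pre_tokens_since_last; infer_instance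

def pvWitness_tokens_since_last : (List (List (String × String))) × Int × String :=
  ([[("pos", "VB")], [("pos", "NN")]], 2, "VB")

def Spec_tokens_since_last (sentence : List (List (String × String))) (index : Int) (target_pos : String) (out : String) : Prop := out = tokens_since_last_alt sentence index target_pos
instance (sentence : List (List (String × String))) (index : Int) (target_pos : String) (out : String) : Decidable (Spec_tokens_since_last sentence index target_pos out) := by unfold Spec_tokens_since_last; infer_instance

-- ===== CLAIM (what is proved, stated in full; the proofs are below) =====
def Claim_equal_tokens_since_last : Prop := ∀ (sentence : List (List (String × String))) (index : Int) (target_pos : String), Dom_tokens_since_last sentence index target_pos → Pre_tokens_since_last sentence index target_pos → Spec_tokens_since_last sentence index target_pos (tokens_since_last sentence index target_pos)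

-- ===== LEMMAS AND PROOFS =====

-- pure shape of A's backward scan over the reversed tag list (nearest tag first)
def scanTags (target_pos : String) : List String → Int × List String
  | [] => (0, [])
  | p :: rest =>
    if p = target_pos then (0, [])
    else
      let r := scanTags target_pos rest
      (r.1 + 1, p :: r.2)

-- the shared tail of both programs: bucket/chain rendering from distance k and the chain list
def render (k : Int) (L : List String) : String :=
  if k = 0 then "NONE"
  else
    let chain := PySem.Str.join "+" L
    let bucket := if k ≤ 5 then PySem.Int.toStr k else ">5"
    if chain ≠ "" then bucket ++ ":" ++ chain else bucket

theorem pvPosAt_eq (sentence : List (List (String × String))) (j : Nat) (hj : j < sentence.length) :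
    pvPosAt sentence j = posOf sentence[j] := by
  simp [pvPosAt, PySem.List.pyGet?_natCast, List.getElem?_eq_getElem hj]

theorem tokensALoop_eq_scan (sentence : List (List (String × String))) (t : String) (j : Nat)
    (hj : j < sentence.length) :
    tokensALoop sentence t j = scanTags t (((sentence.take (j+1)).map posOf).reverse) := by
  induction j with
  | zero =>
    have h0 : sentence.take 1 = [sentence[0]] := by
      cases sentence with
      | nil => simp at hj
      | cons a l => simp
    simp [tokensALoop, h0, scanTags, pvPosAt_eq sentence 0 hj]
  | succ j ih =>
    have hs : sentence.take (j + 1 + 1) = sentence.take (j + 1) ++ [sentence[j + 1]] := by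
      rw [List.take_add_one, List.getElem?_eq_getElem hj]; rfl
    have ihj := ih (Nat.lt_of_succ_lt hj)
    simp only [tokensALoop, hs, List.map_append, List.map_cons, List.map_nil,
      List.reverse_append, List.reverse_cons, List.reverse_nil, List.nil_append,
      List.cons_append, scanTags, pvPosAt_eq sentence (j + 1) hj, ihj]

-- scanTags computed from index?: distance = position of first target (or length), collected = prefix
def kOf (target_pos : String) (r : List String) : Nat :=
  match PySem.List.index? r target_pos with
  | some i => i
  | none => r.length

theorem scanTags_eq (target_pos : String) (r : List String) :
    scanTags target_pos r = ((kOf target_pos r : Int), r.take (kOf target_pos r)) := by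
  induction r with
  | nil => simp [scanTags, kOf, PySem.List.index?]
  | cons p rest ih =>
    by_cases hp : p = target_pos
    · subst hp
      have h0 : kOf p (p :: rest) = 0 := by
        unfold kOf; rw [PySem.List.index?_cons_self]
      simp [scanTags, h0]
    · have hi : PySem.List.index? (p :: rest) target_pos
          = (PySem.List.index? rest target_pos).map (· + 1) :=
        PySem.List.index?_cons_of_ne _ hp
      have hk : kOf target_pos (p :: rest) = kOf target_pos rest + 1 := by
        unfold kOf; rw [hi]
        cases PySem.List.index? rest target_pos <;> simp
      simp only [scanTags, if_neg hp, ih, hk]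
      simp [List.take_succ_cons]

theorem kOf_le (target_pos : String) (r : List String) : kOf target_pos r ≤ r.length := by
  unfold kOf
  cases h : PySem.List.index? r target_pos with
  | none => simp
  | some i =>
    rcases PySem.List.getElem_of_index?_eq_some h with ⟨hk, -, -⟩
    exact Nat.le_of_lt hk

theorem kOf_int (t : String) (r : List String) :
    (match PySem.List.index? r t with
     | some i => (i : Int)
     | none => (r.length : Int)) = (kOf t r : Int) := by
  unfold kOf; cases PySem.List.index? r t <;> simp

theorem take_reverse_take (l : List String) (m : Nat) :
    ((l.reverse.take m).take 3).reverse = l.drop (l.length - min m 3) := by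
  rw [List.take_take, List.take_reverse, List.reverse_reverse]
  congr 1
  omega

theorem tokens_since_last_eq (sentence : List (List (String × String))) (index : Int) (target_pos : String)
    (hlen : index ≤ sentence.length) :
    tokens_since_last sentence index target_pos = tokens_since_last_alt sentence index target_pos := by
  by_cases hneg : index - 1 < 0
  · -- index ≤ 0: A's loop never runs; B's prefix is empty
    have hmax : max index 0 = 0 := by omega
    simp [tokens_since_last, tokens_since_last_alt, hneg, hmax,
      PySem.List.slice_to sentence (le_refl (0 : Int)), PySem.List.index?]
  · -- 0 < index ≤ len: both sides are render applied to the same distance and chain list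
    have hpos : 0 < index := by omega
    have hmax : max index 0 = index := by omega
    set n : Nat := index.toNat with hn
    have hnl : n ≤ sentence.length := by omega
    have hn1 : (index - 1).toNat = n - 1 := by omega
    have hn0 : 0 < n := by omega
    have hjlt : n - 1 < sentence.length := by omega
    have hsucc : n - 1 + 1 = n := by omega
    have htags : PySem.List.slice sentence none (some (max index 0)) = sentence.take n := by
      rw [hmax, PySem.List.slice_to sentence (by omega)]
    set tags : List String := (sentence.take n).map posOf with htagsdef
    have hlentags : tags.length = n := by
      simp [htagsdef, List.length_take, Nat.min_eq_left hnl]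
    set k : Nat := kOf target_pos tags.reverse with hk
    have hkle : k ≤ tags.length := by
      have := kOf_le target_pos tags.reverse
      simpa using this
    have hloop : tokensALoop sentence target_pos (index - 1).toNat
        = ((k : Int), tags.reverse.take k) := by
      rw [hn1, tokensALoop_eq_scan sentence target_pos (n-1) hjlt, hsucc,
        ← htagsdef, scanTags_eq, ← hk]
    have hA : tokens_since_last sentence index target_pos
        = render (k : Int) ((PySem.List.slice (tags.reverse.take k) none (some 3)).reverse) := by
      unfold tokens_since_last render
      rw [if_neg hneg, hloop]
    have hB : tokens_since_last_alt sentence index target_pos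
        = render (k : Int)
            (PySem.List.slice tags (some ((tags.length : Int) - min (k : Int) 3)) none) := by
      unfold tokens_since_last_alt render
      simp only [htags, ← htagsdef, kOf_int, ← hk]
    have hL : (PySem.List.slice (tags.reverse.take k) none (some 3)).reverse
        = PySem.List.slice tags (some ((tags.length : Int) - min (k : Int) 3)) none := by
      rw [PySem.List.slice_to _ (by norm_num : (0:Int) ≤ 3),
          PySem.List.slice_from tags (by omega)]
      have hm : ((tags.length : Int) - min (k : Int) 3).toNat = tags.length - min k 3 := by
        omega
      have h3 : ((3 : Int)).toNat = 3 := rfl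
      rw [hm, h3, take_reverse_take]
    rw [hA, hB, hL]
-- ===== VERDICT (by name: the statement is the Claim_ definition above) =====
theorem tokens_since_last_spec : Claim_equal_tokens_since_last := by
  intro sentence index target_pos _hdom hpre
  exact tokens_since_last_eq sentence index target_pos hpre.1
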